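-- pv_equiv track=rewrite | github.com/kardasbart/divisibility-regex | divisibility.py | get_balanced_suffix_len
-- ===== SOURCE A (Python) =====
-- from typing import List, Set, Dict, Tuple, Optional, Any
--
-- def get_balanced_suffix_len(s: str) -> Set[int]:
--     """Returns valid lengths of suffixes that are balanced (from the end)."""
--     valid_lens = {0}
--     stack = []
--     n = len(s)
--     in_bracket = False
--
--     for i in range(n - 1, -1, -1):
--         char = s[i]
--         # Check escape
--         bs_count = 0
--         k = i - 1
--         while k >= 0 and s[k] == '\\':
--             bs_count += 1
--             k -= 1
--
--         is_escaped = (bs_count % 2 == 1)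
--
--         if is_escaped:
--             pass
--         elif in_bracket:
--             if char == '[': # Closing the bracket (since we are going backwards)
--                  in_bracket = False
--         else:
--             if char == ']':
--                 in_bracket = True
--             elif char == ')':
--                 stack.append(')')
--             elif char == '(':
--                 if not stack:
--                     return valid_lens
--                 stack.pop()
--             elif char == '}':
--                 in_bracket = True
--             elif char == '{':
--                 if in_bracket: in_bracket = False
--
--         if not in_bracket and not stack:
--              # Check if the split point (n - i) is safe.
--              if s[i] in {'*', '+', '?', '{'}:
--                  if not is_escaped:
--                       pass # Reject
--                  else:
--                       valid_lens.add(n - i)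
--              else:
--                  valid_lens.add(n - i)
--
--     return valid_lens
-- ===== SOURCE B (Python) =====
-- def get_balanced_suffix_len(s: str):
--     """Returns valid lengths of suffixes that are balanced (from the end)."""
--     n = len(s)
--     # Stage 1: escape parity of each index from backslash runs, one forward pass.
--     esc, run = [], 0
--     for c in s:
--         esc.append(run % 2 == 1)
--         run = run + 1 if c == '\\' else 0
--     # Stage 2: trajectory of (depth, in_bracket) states while walking the string
--     # backwards, truncated at the first unmatched '('.
--     states = []
--     d, b = 0, False
--     for c, e in zip(reversed(s), reversed(esc)):
--         if e:
--             pass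
--         elif b:
--             b = c != '['
--         elif c in ']}':
--             b = True
--         elif c == ')':
--             d += 1
--         elif c == '(':
--             if d == 0:
--                 break
--             d -= 1
--         states.append((d, b))
--     # Stage 3: length n-i is valid iff the state after consuming s[i] is balanced
--     # and the split point s[i] is not an unescaped quantifier.
--     return {0} | {n - i for (d, b), i in zip(states, range(n - 1, -1, -1))
--                   if d == 0 and not b and (esc[i] or s[i] not in '*+?{')}
-- ===== Notes on version B (the rewrite author's own statement) =====
-- stated objective: alternative
-- what changed: B replaces A's single interleaved backward loop (per-index backslash rescanning, one-symbol stack, set mutation inside the loop) by three staged passes: a forward escape-parity pass, a backward (depth,in_bracket) state-trajectory list truncated where the walk hits an unmatched opening parenthesis, and a final set comprehension over the trajectory zipped with the indices.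
import Mathlib
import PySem

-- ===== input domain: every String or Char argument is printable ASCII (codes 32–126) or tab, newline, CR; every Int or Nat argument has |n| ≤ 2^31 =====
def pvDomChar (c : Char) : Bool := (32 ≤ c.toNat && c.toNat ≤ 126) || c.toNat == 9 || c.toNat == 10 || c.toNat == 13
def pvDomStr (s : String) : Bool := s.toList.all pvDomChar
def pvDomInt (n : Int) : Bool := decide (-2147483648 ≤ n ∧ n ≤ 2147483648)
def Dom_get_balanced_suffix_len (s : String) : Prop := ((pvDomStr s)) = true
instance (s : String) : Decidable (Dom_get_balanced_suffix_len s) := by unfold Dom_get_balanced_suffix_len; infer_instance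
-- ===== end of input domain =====

-- B restructures A into three staged passes: a forward escape-parity pass (A rescans the
-- backslash run per index), a backward state-trajectory list with a depth counter instead
-- of A's stack, and a final set comprehension over the trajectory (A interleaves the
-- collection inside its loop); objective: alternative, return value proved equal.

-- ===== PORT A =====
-- inner `while k >= 0 and s[k] == '\\'` scan of A: number of consecutive
-- backslashes immediately before index i
def aEsc (cs : List Char) : Nat → Int
  | 0 => 0
  | k + 1 => if cs.getD k ' ' = '\\' then aEsc cs k + 1 else 0

-- A's main backward loop; fuel i+1 means "current index is i"; state = (valid, stack, in_bracket)
def aLoop (cs : List Char) : Nat → List Int → List Char → Bool → List Int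
  | 0, valid, _, _ => valid
  | i + 1, valid, stack, inb =>
    let n := cs.length
    let c := cs.getD i ' '
    let isEsc := PySem.Int.mod (aEsc cs i) 2 == 1
    let st :=
      if isEsc then (valid, stack, inb, false)
      else if inb then
        (if c = '[' then (valid, stack, false, false) else (valid, stack, inb, false))
      else if c = ']' then (valid, stack, true, false)
      else if c = ')' then (valid, stack ++ [')'], inb, false)
      else if c = '(' then
        (if stack = [] then (valid, stack, inb, true) else (valid, stack.dropLast, inb, false))
      else if c = '}' then (valid, stack, true, false)
      else (valid, stack, inb, false)   -- includes '{' : `if in_bracket: …` is a no-op here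
    match st with
    | (valid2, stack2, inb2, ret) =>
      if ret then valid2
      else
        let valid3 :=
          if inb2 = false ∧ stack2 = [] then
            if c = '*' ∨ c = '+' ∨ c = '?' ∨ c = '{' then
              if isEsc then PySem.Set.add valid2 ((n : Int) - (i : Int)) else valid2
            else PySem.Set.add valid2 ((n : Int) - (i : Int))
          else valid2
        aLoop cs i valid3 stack2 inb2

def get_balanced_suffix_len (s : String) : List Int :=
  let cs := s.toList
  aLoop cs cs.length (PySem.Set.ofList [(0 : Int)]) [] false

-- ===== PORT B =====
-- Stage 1 of Source B: the forward pass `esc.append(run % 2 == 1); run = run+1 if c=='\\' else 0`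
def bEsc (r : Int) : List Char → List Bool
  | [] => []
  | c :: rest => (PySem.Int.mod r 2 == 1) :: bEsc (if c = '\\' then r + 1 else 0) rest

-- Stage 2 of Source B: trajectory of (depth, in_bracket) states over the reversed annotated
-- characters, truncated where the walk hits an unmatched opening parenthesis (the `break`)
def bStates (d : Int) (b : Bool) : List (Char × Bool) → List (Int × Bool)
  | [] => []
  | (c, e) :: rest =>
    if e then (d, b) :: bStates d b rest
    else if b then (d, decide ¬(c = '[')) :: bStates d (decide ¬(c = '[')) rest
    else if c = ']' ∨ c = '}' then (d, true) :: bStates d true rest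
    else if c = ')' then (d + 1, b) :: bStates (d + 1) b rest
    else if c = '(' then
      (if d = 0 then [] else (d - 1, b) :: bStates (d - 1) b rest)
    else (d, b) :: bStates d b rest

-- Stage 3 of Source B: `{0} | {n - i for (d, b), i in zip(states, range(n-1, -1, -1)) if …}`;
-- the indices i drawn from the range are always in [0, n), so `.toNat` + `getD` is exact
-- for the Python indexings esc[i] and s[i] here
def get_balanced_suffix_len_alt (s : String) : List Int :=
  let cs := s.toList
  let n := cs.length
  let esc := bEsc 0 cs
  let sts := bStates 0 false (List.zip cs.reverse esc.reverse)
  PySem.Set.union (PySem.Set.ofList [(0 : Int)])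
    (PySem.Set.ofList
      ((List.zip sts (PySem.List.pyRange ((n : Int) - 1) (-1) (-1))).filterMap
        (fun p =>
          if p.1.1 = 0 ∧ p.1.2 = false ∧
              (esc.getD p.2.toNat false = true ∨
               ¬(cs.getD p.2.toNat ' ' = '*' ∨ cs.getD p.2.toNat ' ' = '+' ∨
                 cs.getD p.2.toNat ' ' = '?' ∨ cs.getD p.2.toNat ' ' = '{'))
          then some ((n : Int) - p.2) else none)))

-- ===== PRECONDITION & SPEC =====
def Spec_get_balanced_suffix_len (s : String) (out : List Int) : Prop := out = get_balanced_suffix_len_alt s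
instance (s : String) (out : List Int) : Decidable (Spec_get_balanced_suffix_len s out) := by unfold Spec_get_balanced_suffix_len; infer_instance

-- ===== CLAIM (what is proved, stated in full; the proofs are below) =====
def Claim_equal_get_balanced_suffix_len : Prop := ∀ (s : String), Dom_get_balanced_suffix_len s → Spec_get_balanced_suffix_len s (get_balanced_suffix_len s)

-- ===== LEMMAS AND PROOFS =====

-- common reference recursion: the lengths collected from indices i-1 … 0, given the
-- current state (d, b); both ports are reduced to it
def collect (cs : List Char) (esc : List Bool) : Nat → Int → Bool → List Int
  | 0, _, _ => []
  | i + 1, d, b =>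
    let n := cs.length
    let c := cs.getD i ' '
    let e := esc.getD i false
    let st : Option (Int × Bool) :=
      if e then some (d, b)
      else if b then some (d, decide ¬(c = '['))
      else if c = ']' ∨ c = '}' then some (d, true)
      else if c = ')' then some (d + 1, b)
      else if c = '(' then (if d = 0 then none else some (d - 1, b))
      else some (d, b)
    match st with
    | none => []
    | some (d', b') =>
      (if d' = 0 ∧ b' = false ∧ (e = true ∨ ¬(c = '*' ∨ c = '+' ∨ c = '?' ∨ c = '{'))
       then [((n : Int) - (i : Int))] else []) ++ collect cs esc i d' b'

-- value of B's running backslash counter after i steps of the forward pass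
def escVal (cs : List Char) (r : Int) : Nat → Int
  | 0 => r
  | i + 1 =>
    match cs with
    | [] => r
    | c :: rest => escVal rest (if c = '\\' then r + 1 else 0) i

lemma escVal_succ : ∀ (i : Nat) (cs : List Char) (r : Int), i < cs.length →
    escVal cs r (i + 1) = if cs.getD i ' ' = '\\' then escVal cs r i + 1 else 0 := by
  intro i
  induction i with
  | zero =>
    intro cs r h
    cases cs with
    | nil => simp at h
    | cons c rest => simp [escVal]
  | succ j ih =>
    intro cs r h
    cases cs with
    | nil => simp at h
    | cons c rest =>
      have : j < rest.length := by simpa using Nat.lt_of_succ_lt_succ h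
      simp only [escVal, List.getD_cons_succ]
      exact ih rest _ this

lemma escVal_eq_aEsc : ∀ (i : Nat) (cs : List Char), i ≤ cs.length →
    escVal cs 0 i = aEsc cs i := by
  intro i
  induction i with
  | zero => intro cs _; simp [escVal, aEsc]
  | succ j ih =>
    intro cs h
    have hj : j < cs.length := Nat.lt_of_succ_le h
    rw [escVal_succ j cs 0 hj, aEsc, ih cs (Nat.le_of_lt hj)]

lemma bEsc_getD : ∀ (cs : List Char) (r : Int) (i : Nat), i < cs.length →
    (bEsc r cs).getD i false = (PySem.Int.mod (escVal cs r i) 2 == 1) := by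
  intro cs
  induction cs with
  | nil => intro r i h; simp at h
  | cons c rest ih =>
    intro r i h
    cases i with
    | zero => simp [bEsc, escVal]
    | succ j =>
      have : j < rest.length := by simpa using Nat.lt_of_succ_lt_succ h
      simp only [bEsc, List.getD_cons_succ, escVal]
      exact ih _ j this

lemma esc_eq (cs : List Char) (i : Nat) (h : i < cs.length) :
    (bEsc 0 cs).getD i false = (PySem.Int.mod (aEsc cs i) 2 == 1) := by
  rw [bEsc_getD cs 0 i h, escVal_eq_aEsc i cs (Nat.le_of_lt h)]

lemma length_bEsc : ∀ (cs : List Char) (r : Int), (bEsc r cs).length = cs.length := by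
  intro cs
  induction cs with
  | nil => intro r; rfl
  | cons c rest ih => intro r; simp [bEsc, ih]

-- every collected length exceeds (n : Int) - i
lemma collect_lower : ∀ (i : Nat) (cs : List Char) (esc : List Bool) (d : Int) (b : Bool),
    ∀ x ∈ collect cs esc i d b, (cs.length : Int) - i < x := by
  intro i
  induction i with
  | zero => intro cs esc d b x hx; simp [collect] at hx
  | succ j ih =>
    intro cs esc d b x hx
    rw [collect] at hx
    set c := cs.getD j ' '
    set e := esc.getD j false
    revert hx
    split
    · intro hx; simp at hx
    · rename_i d' b' hst
      intro hx
      rcases List.mem_append.1 hx with h1 | h1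
      · revert h1; split
        · intro h1
          simp at h1
          subst h1
          push_cast
          omega
        · intro h1; simp at h1
      · have := ih cs esc d' b' x h1
        push_cast at this ⊢
        omega

lemma collect_nodup : ∀ (i : Nat) (cs : List Char) (esc : List Bool) (d : Int) (b : Bool),
    (collect cs esc i d b).Nodup := by
  intro i
  induction i with
  | zero => intro cs esc d b; simp [collect]
  | succ j ih =>
    intro cs esc d b
    rw [collect]
    split
    · simp
    · rename_i d' b' hst
      refine List.Nodup.append ?_ (ih cs esc d' b') ?_
      · split <;> simp
      · intro x hx hx'
        have hlt := collect_lower j cs esc d' b' x hx'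
        revert hx; split
        · intro hx
          simp at hx
          subst hx
          omega
        · intro hx; simp at hx

-- Set.add appends when the element is new
lemma set_add_new {x : Int} {s : List Int} (h : x ∉ s) : PySem.Set.add s x = s ++ [x] := by
  simp [PySem.Set.add, PySem.Set.contains]
  exact h

-- foldl of Set.add over fresh, duplicate-free elements is plain append
lemma set_update_append : ∀ (l s : List Int), l.Nodup → (∀ x ∈ l, x ∉ s) →
    l.foldl PySem.Set.add s = s ++ l := by
  intro l
  induction l with
  | nil => intro s _ _; simp
  | cons x rest ih =>
    intro s hnd hfr
    have hx : x ∉ s := hfr x (by simp)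
    rw [List.foldl_cons, set_add_new hx, ih (s ++ [x]) (List.Nodup.of_cons hnd)]
    · simp
    · intro y hy
      simp only [List.mem_append, List.mem_singleton]
      rintro (h1 | h1)
      · exact hfr y (by simp [hy]) h1
      · subst h1
        exact (List.nodup_cons.1 hnd).1 hy

-- ===== A-side reduction: aLoop = valid ++ collect =====
lemma aLoop_eq_collect : ∀ (i : Nat) (cs : List Char), i ≤ cs.length →
    ∀ (valid : List Int) (stack : List Char) (inb : Bool),
    (∀ x ∈ valid, x ≤ (cs.length : Int) - i) →
    aLoop cs i valid stack inb = valid ++ collect cs (bEsc 0 cs) i (stack.length : Int) inb := by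
  intro i
  induction i with
  | zero => intro cs _ valid stack inb _; simp [aLoop, collect]
  | succ j ih =>
    intro cs h valid stack inb hinv
    have hj : j < cs.length := Nat.lt_of_succ_le h
    have he := esc_eq cs j hj
    have hlen : ∀ (st : List Char), ((st.length : Int) = 0) = (st = []) := by
      intro st; simp [List.length_eq_zero_iff]
    have hnot : ((cs.length : Int) - (j : Int)) ∉ valid := by
      intro hmem
      have := hinv _ hmem
      push_cast at this
      omega
    have hinv' : ∀ x ∈ valid, x ≤ (cs.length : Int) - j := by
      intro x hx
      have := hinv x hx
      push_cast at this ⊢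
      omega
    have hinvadd : ∀ x ∈ valid ++ [(cs.length : Int) - (j : Int)],
        x ≤ (cs.length : Int) - j := by
      intro x hx
      rcases List.mem_append.1 hx with h1 | h1
      · exact hinv' x h1
      · simp at h1; omega
    rw [aLoop, collect, he]
    set c := cs.getD j ' ' with hc
    set isE := (PySem.Int.mod (aEsc cs j) 2 == 1) with hE
    have hIH := ih cs (Nat.le_of_lt hj)
    set v : Int := (cs.length : Int) - (j : Int) with hv
    by_cases h1 : isE = true
    · simp only [h1, if_true, Bool.false_eq_true, if_false, true_or]
      by_cases hs : stack = []
      · subst hs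
        cases inb with
        | false =>
          simp [set_add_new hnot, hIH (valid ++ [v]) [] false hinvadd]
        | true =>
          simp [hIH valid [] true hinv']
      · have hz : ¬((stack.length : Int) = 0) := by simpa [hlen] using hs
        simp [hs, hz, hIH valid stack inb hinv']
    · have h1' : isE = false := by revert h1; cases isE <;> simp
      simp only [h1', Bool.false_eq_true, if_false, false_or]
      cases inb with
      | true =>
        by_cases hbr : c = '['
        · by_cases hs : stack = []
          · subst hs
            simp [hbr, set_add_new hnot, hIH (valid ++ [v]) [] false hinvadd]
          · have hz : ¬((stack.length : Int) = 0) := by simpa [hlen] using hs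
            simp [hbr, hs, hz, hIH valid stack false hinv']
        · simp [hbr, hIH valid stack true hinv']
      | false =>
        by_cases h3 : c = ']'
        · simp [h3, hIH valid stack true hinv']
        · by_cases h4 : c = ')'
          · have hq : ¬(c = '*' ∨ c = '+' ∨ c = '?' ∨ c = '{') := by rw [h4]; decide
            have h8' : ¬ c = '}' := by rw [h4]; decide
            have hne : ¬(((stack.length : Int)) + 1 = 0) := by positivity
            simp [h3, h4, h8', hq, hne, hIH valid (stack ++ [')']) false hinv']
          · by_cases h6 : c = '('
            · have h8' : ¬ c = '}' := by rw [h6]; decide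
              by_cases hs : stack = []
              · subst hs
                simp [h3, h4, h6, h8']
              · have hz : ¬((stack.length : Int) = 0) := by simpa [hlen] using hs
                have hq : ¬(c = '*' ∨ c = '+' ∨ c = '?' ∨ c = '{') := by rw [h6]; decide
                have hdl : ((stack.dropLast.length : Int)) = (stack.length : Int) - 1 := by
                  have h0 : stack.length ≠ 0 := by simpa [List.length_eq_zero_iff] using hs
                  have h7 : stack.dropLast.length = stack.length - 1 := by simp
                  rw [h7]; push_cast; omega
                have hiff : (stack.dropLast = []) ↔ ((stack.length : Int) - 1 = 0) := by
                  rw [← List.length_eq_zero_iff, ← hdl]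
                  exact Int.natCast_eq_zero.symm
                by_cases hd : (stack.length : Int) - 1 = 0
                · have hd' : stack.dropLast = [] := hiff.2 hd
                  simp [h3, h4, h6, h8', hq, hz, hs, hd, hd', hdl, set_add_new hnot]
                  rw [hIH (valid ++ [v]) [] false hinvadd]
                  simp
                · have hd' : ¬(stack.dropLast = []) := fun hx => hd (hiff.1 hx)
                  simp [h3, h4, h6, h8', hq, hz, hs, hd, hd', hdl]
                  rw [hIH valid stack.dropLast false hinv', hdl]
            · by_cases h8 : c = '}'
              · simp [h3, h4, h6, h8, hIH valid stack true hinv']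
              · by_cases hs : stack = []
                · subst hs
                  by_cases hq : c = '*' ∨ c = '+' ∨ c = '?' ∨ c = '{'
                  · simp [h3, h4, h6, h8, hq, hIH valid [] false hinv']
                  · simp [h3, h4, h6, h8, hq, set_add_new hnot,
                      hIH (valid ++ [v]) [] false hinvadd]
                · have hz : ¬((stack.length : Int) = 0) := by simpa [hlen] using hs
                  simp [h3, h4, h6, h8, hs, hz, hIH valid stack false hinv']

-- ===== B-side reduction: the staged zip/filterMap pipeline = collect =====
lemma bStates_zip_eq_collect : ∀ (i : Nat) (cs : List Char), i ≤ cs.length →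
    ∀ (d : Int) (b : Bool),
    (List.zip (bStates d b (List.zip (cs.take i).reverse ((bEsc 0 cs).take i).reverse))
        (PySem.List.pyRange ((i : Int) - 1) (-1) (-1))).filterMap
      (fun p =>
        if p.1.1 = 0 ∧ p.1.2 = false ∧
            ((bEsc 0 cs).getD p.2.toNat false = true ∨
             ¬(cs.getD p.2.toNat ' ' = '*' ∨ cs.getD p.2.toNat ' ' = '+' ∨
               cs.getD p.2.toNat ' ' = '?' ∨ cs.getD p.2.toNat ' ' = '{'))
        then some ((cs.length : Int) - p.2) else none)
      = collect cs (bEsc 0 cs) i d b := by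
  intro i
  induction i with
  | zero =>
    intro cs _ d b
    simp [bStates, collect]
  | succ j ih =>
    intro cs h d b
    have hj : j < cs.length := Nat.lt_of_succ_le h
    have hle : j ≤ cs.length := Nat.le_of_lt hj
    have hje : j < (bEsc 0 cs).length := by rw [length_bEsc]; exact hj
    have htake : (cs.take (j + 1)).reverse = cs.getD j ' ' :: (cs.take j).reverse := by
      rw [List.take_succ]
      simp [List.getElem?_eq_getElem hj, List.getD_eq_getElem?_getD,
        List.getElem?_eq_getElem hj]
    have htakeE : ((bEsc 0 cs).take (j + 1)).reverse =
        (bEsc 0 cs).getD j false :: ((bEsc 0 cs).take j).reverse := by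
      rw [List.take_succ]
      simp [List.getElem?_eq_getElem hje, List.getD_eq_getElem?_getD,
        List.getElem?_eq_getElem hje]
    have hrange : PySem.List.pyRange (((j : Int) + 1) - 1) (-1) (-1) =
        (j : Int) :: PySem.List.pyRange ((j : Int) - 1) (-1) (-1) := by
      have h0 : ((j : Int) + 1) - 1 = (j : Int) := by omega
      rw [h0, PySem.List.pyRange_neg_one_cons (by omega)]
    have htn : ((j : Int)).toNat = j := by omega
    rw [collect]
    push_cast
    rw [htake, htakeE, List.zip_cons_cons, hrange]
    generalize hcg : cs.getD j ' ' = ch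
    have hcg2 : cs[j]?.getD ' ' = ch := by rw [← List.getD_eq_getElem?_getD]; exact hcg
    generalize heg : (bEsc 0 cs).getD j false = ev
    have heg2 : (bEsc 0 cs)[j]?.getD false = ev := by
      rw [← List.getD_eq_getElem?_getD]; exact heg
    have hIH := ih cs hle
    cases ev with
    | true =>
      have hstep : bStates d b ((ch, true) :: List.zip (cs.take j).reverse
          ((bEsc 0 cs).take j).reverse) = (d, b) :: bStates d b (List.zip (cs.take j).reverse
          ((bEsc 0 cs).take j).reverse) := by simp [bStates]
      rw [hstep, List.zip_cons_cons, List.filterMap_cons, hIH d b]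
      simp [htn, hcg2, heg2]
      by_cases hP : d = 0 ∧ b = false <;> simp [hP]
    | false =>
      cases b with
      | true =>
        by_cases hbr : ch = '['
        · have hstep : bStates d true ((ch, false) :: List.zip (cs.take j).reverse
              ((bEsc 0 cs).take j).reverse) = (d, false) :: bStates d false
              (List.zip (cs.take j).reverse ((bEsc 0 cs).take j).reverse) := by
            simp [bStates, hbr]
          rw [hstep, List.zip_cons_cons, List.filterMap_cons, hIH d false]
          simp [htn, hcg2, heg2, hbr]
          by_cases hP : d = 0 <;> simp [hP]
        · have hstep : bStates d true ((ch, false) :: List.zip (cs.take j).reverse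
              ((bEsc 0 cs).take j).reverse) = (d, true) :: bStates d true
              (List.zip (cs.take j).reverse ((bEsc 0 cs).take j).reverse) := by
            simp [bStates, hbr]
          rw [hstep, List.zip_cons_cons, List.filterMap_cons, hIH d true]
          simp [htn, hcg2, heg2, hbr]
      | false =>
        by_cases h34 : ch = ']' ∨ ch = '}'
        · have hstep : bStates d false ((ch, false) :: List.zip (cs.take j).reverse
              ((bEsc 0 cs).take j).reverse) = (d, true) :: bStates d true
              (List.zip (cs.take j).reverse ((bEsc 0 cs).take j).reverse) := by
            rcases h34 with h3 | h3 <;> simp [bStates, h3]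
          rw [hstep, List.zip_cons_cons, List.filterMap_cons, hIH d true]
          simp [htn, hcg2, heg2, h34]
        · by_cases h4 : ch = ')'
          · have hstep : bStates d false ((ch, false) :: List.zip (cs.take j).reverse
                ((bEsc 0 cs).take j).reverse) = (d + 1, false) :: bStates (d + 1) false
                (List.zip (cs.take j).reverse ((bEsc 0 cs).take j).reverse) := by
              simp [bStates, h34, h4]
            rw [hstep, List.zip_cons_cons, List.filterMap_cons, hIH (d + 1) false]
            simp [htn, hcg2, heg2, h34, h4]
            by_cases hP : d + 1 = 0 <;> simp [hP]
          · by_cases h6 : ch = '('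
            · by_cases hd0 : d = 0
              · have hstep : bStates d false ((ch, false) :: List.zip (cs.take j).reverse
                    ((bEsc 0 cs).take j).reverse) = [] := by
                  simp [bStates, h34, h4, h6, hd0]
                rw [hstep]
                simp [h34, h4, h6, hd0]
              · have hstep : bStates d false ((ch, false) :: List.zip (cs.take j).reverse
                    ((bEsc 0 cs).take j).reverse) = (d - 1, false) :: bStates (d - 1) false
                    (List.zip (cs.take j).reverse ((bEsc 0 cs).take j).reverse) := by
                  simp [bStates, h34, h4, h6, hd0]
                rw [hstep, List.zip_cons_cons, List.filterMap_cons, hIH (d - 1) false]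
                simp [htn, hcg2, heg2, h34, h4, h6, hd0]
                by_cases hP : d - 1 = 0 <;> simp [hP]
            · have hstep : bStates d false ((ch, false) :: List.zip (cs.take j).reverse
                  ((bEsc 0 cs).take j).reverse) = (d, false) :: bStates d false
                  (List.zip (cs.take j).reverse ((bEsc 0 cs).take j).reverse) := by
                simp [bStates, h34, h4, h6]
              rw [hstep, List.zip_cons_cons, List.filterMap_cons, hIH d false]
              simp [htn, hcg2, heg2, h34, h4, h6]
              by_cases hP : d = 0 ∧ ¬ch = '*' ∧ ¬ch = '+' ∧ ¬ch = '?' ∧ ¬ch = '{' <;>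
                simp [hP]

-- ===== VERDICT (by name: the statement is the Claim_ definition above) =====
theorem get_balanced_suffix_len_spec : Claim_equal_get_balanced_suffix_len := by
  intro s _
  unfold Spec_get_balanced_suffix_len get_balanced_suffix_len get_balanced_suffix_len_alt
  dsimp only
  set cs := s.toList with hcs
  set esc := bEsc 0 cs with hesc
  set n := cs.length with hn
  -- A side
  have hA : aLoop cs n (PySem.Set.ofList [(0 : Int)]) [] false =
      [(0 : Int)] ++ collect cs esc n 0 false := by
    have h0 : PySem.Set.ofList [(0 : Int)] = [(0 : Int)] := by decide
    rw [h0]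
    have := aLoop_eq_collect n cs (le_refl _) [(0 : Int)] [] false
      (by intro x hx; simp at hx; omega)
    simpa using this
  -- B side
  have htakeA : cs.take n = cs := by simp [hn]
  have htakeB : esc.take n = esc := by
    have : esc.length = n := by rw [hesc, hn]; exact length_bEsc cs 0
    simp [this]
  have hB := bStates_zip_eq_collect n cs (le_refl _) 0 false
  rw [htakeA, htakeB] at hB
  rw [hA, hB]
  -- the union of {0} with the duplicate-free positive collection is plain append
  have hofl0 : PySem.Set.ofList [(0 : Int)] = [(0 : Int)] := by decide
  have hnd := collect_nodup n cs esc 0 false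
  have hpos : ∀ x ∈ collect cs esc n 0 false, 0 < x := by
    intro x hx
    have := collect_lower n cs esc 0 false x hx
    omega
  have hofl : PySem.Set.ofList (collect cs esc n 0 false) = collect cs esc n 0 false := by
    rw [PySem.Set.ofList_eq_foldl]
    simpa using set_update_append (collect cs esc n 0 false) [] hnd (by simp)
  rw [hofl0, hofl]
  show [(0 : Int)] ++ collect cs esc n 0 false =
    (collect cs esc n 0 false).foldl PySem.Set.add [(0 : Int)]
  rw [set_update_append (collect cs esc n 0 false) [(0 : Int)] hnd]
  intro x hx
  have := hpos x hx
  simp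
  omega
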